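-- pv_equiv track=rewrite | github.com/dllu/adventofcode | 2023/python/day12a/day12a.py | does_fit
-- ===== SOURCE A (Python) =====
-- def does_fit(possible, counts):
--     working_groups = [x for x in possible.split('.') if '#' in x]
--     if len(working_groups) != len(counts):
--         return False
--     for i in range(len(working_groups)):
--         if len(working_groups[i]) != counts[i]:
--             return False
--     return True
-- ===== SOURCE B (Python) =====
-- def does_fit(possible, counts):
--     run = 0
--     seen = False
--     idx = 0
--     for ch in possible + '.':
--         if ch == '.':
--             if seen:
--                 if idx >= len(counts) or run != counts[idx]:
--                     return False
--                 idx += 1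
--             run = 0
--             seen = False
--         else:
--             run += 1
--             seen = seen or ch == '#'
--     return idx == len(counts)
-- ===== Notes on version B (the rewrite author's own statement) =====
-- stated objective: alternative
-- what changed: A splits the string on '.', filters groups containing '#', and compares the length list against counts; B makes a single left-to-right pass maintaining the current run length, a '#-seen' flag and an index into counts, validating each run as it ends and never building intermediate lists.
import Mathlib
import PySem

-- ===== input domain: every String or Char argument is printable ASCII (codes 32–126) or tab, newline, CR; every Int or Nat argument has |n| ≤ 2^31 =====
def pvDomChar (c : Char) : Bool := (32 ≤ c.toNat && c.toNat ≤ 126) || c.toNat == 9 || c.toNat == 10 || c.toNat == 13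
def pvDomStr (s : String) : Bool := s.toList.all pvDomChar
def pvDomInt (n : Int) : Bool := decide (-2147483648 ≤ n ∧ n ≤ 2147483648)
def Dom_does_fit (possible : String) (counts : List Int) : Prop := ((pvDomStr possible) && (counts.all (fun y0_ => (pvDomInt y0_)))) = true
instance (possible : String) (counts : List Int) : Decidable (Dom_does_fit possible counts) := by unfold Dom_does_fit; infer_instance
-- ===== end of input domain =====

-- B replaces A's split/filter/compare pipeline by a single left-to-right pass that validates each
-- '#'-marked run against the counts incrementally (objective: alternative decomposition, no intermediate lists).


-- ===== PORT A =====
-- 'for i in range(len(working_groups)): if len(working_groups[i]) != counts[i]: return False'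
-- ported as the obvious simultaneous recursion over the two lists; does_fit runs it only under the
-- equal-length guard, where it visits exactly the pairs (working_groups[i], counts[i]).
def aLoop : List (List Char) → List Int → Bool
  | [], _ => true
  | _ :: _, [] => true
  | g :: gs, k :: ks => if (g.length : Int) ≠ k then false else aLoop gs ks

-- possible.split('.') is PySem.Chars.splitOn on code points (the separator "." is a nonempty literal,
-- so Python's split never raises and the Option-free form is exact)
def does_fit (possible : String) (counts : List Int) : Bool :=
  let working_groups :=
    (PySem.Chars.splitOn possible.toList ['.']).filter (fun x => PySem.Chars.isIn ['#'] x)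
  if working_groups.length ≠ counts.length then false
  else aLoop working_groups counts

-- ===== PORT B =====
-- Source B's for-loop over (possible + '.'), state (run, seen, remaining counts);
-- 'idx'/'idx >= len(counts)'/'idx == len(counts)' of Source B is the remaining-counts list here
def bLoop : List Char → Int → Bool → List Int → Bool
  | [], _, _, ks => ks.isEmpty
  | c :: cs, run, seen, ks =>
    if c = '.' then
      if seen then
        match ks with
        | [] => false
        | k :: ks' => if run ≠ k then false else bLoop cs 0 false ks'
      else bLoop cs 0 false ks
    else bLoop cs (run + 1) (seen || c = '#') ks

def does_fit_alt (possible : String) (counts : List Int) : Bool :=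
  bLoop (possible.toList ++ ['.']) 0 false counts

-- ===== PRECONDITION & SPEC =====
def Spec_does_fit (possible : String) (counts : List Int) (out : Bool) : Prop := out = does_fit_alt possible counts
instance (possible : String) (counts : List Int) (out : Bool) : Decidable (Spec_does_fit possible counts out) := by unfold Spec_does_fit; infer_instance

-- ===== CLAIM (what is proved, stated in full; the proofs are below) =====
def Claim_equal_does_fit : Prop := ∀ (possible : String) (counts : List Int), Dom_does_fit possible counts → Spec_does_fit possible counts (does_fit possible counts)

-- ===== LEMMAS AND PROOFS =====

-- the accumulator form of splitting on '.' (cur is the reversed pending piece)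
def splitAux : List Char → List Char → List (List Char)
  | [], cur => [cur.reverse]
  | c :: cs, cur => if c = '.' then cur.reverse :: splitAux cs [] else splitAux cs (c :: cur)

-- the lengths (as Ints) of the '#'-containing groups of cs, given a pending partial group (run, seen)
def segs : List Char → Int → Bool → List Int
  | [], run, seen => if seen then [run] else []
  | c :: cs, run, seen =>
    if c = '.' then (if seen then [run] else []) ++ segs cs 0 false
    else segs cs (run + 1) (seen || c = '#')

theorem splitOn_go_eq (fuel : Nat) (l cur : List Char) (acc : List (List Char))
    (h : l.length < fuel) :
    PySem.Chars.splitOn.go ['.'] fuel l cur acc = acc.reverse ++ splitAux l cur := by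
  induction fuel generalizing l cur acc with
  | zero => omega
  | succ n ih =>
    cases l with
    | nil => simp [PySem.Chars.splitOn.go, splitAux]
    | cons c rest =>
      simp only [PySem.Chars.splitOn.go, List.isPrefixOf, splitAux]
      by_cases hc : c = '.'
      · simp [hc, ih rest [] _ (by simp at h ⊢; omega)]
      · simp [hc, Ne.symm hc, ih rest (c :: cur) acc (by simp at h ⊢; omega)]

theorem splitOn_eq_splitAux (cs : List Char) :
    PySem.Chars.splitOn cs ['.'] = splitAux cs [] := by
  rw [PySem.Chars.splitOn, splitOn_go_eq _ _ _ _ (by omega)]; rfl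

theorem isIn_hash (g : List Char) : PySem.Chars.isIn ['#'] g = g.contains '#' := by
  by_cases h : '#' ∈ g
  · rw [(PySem.Chars.isIn_iff_infix _ _).2]
    · simp [h]
    · obtain ⟨a, b, rfl⟩ := List.append_of_mem h
      exact ⟨a, b, by simp⟩
  · rw [(PySem.Chars.isIn_eq_false_iff _ _).2 (fun hin => h (hin.mem (by simp)))]
    simp [h]

theorem filter_map_splitAux (cs cur : List Char) :
    ((splitAux cs cur).filter (fun g => PySem.Chars.isIn ['#'] g)).map
        (fun g => (g.length : Int))
      = segs cs (cur.length : Int) (cur.contains '#') := by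
  induction cs generalizing cur with
  | nil =>
    simp only [splitAux, segs, List.filter, isIn_hash]
    by_cases h : '#' ∈ cur <;> simp [h]
  | cons c cs ih =>
    simp only [splitAux, segs]
    by_cases hc : c = '.'
    · subst hc
      rw [if_pos rfl, if_pos rfl, List.filter_cons]
      have hfc : (PySem.Chars.isIn ['#'] cur.reverse) = cur.contains '#' := by
        rw [isIn_hash]; simp
      rw [hfc]
      by_cases h : '#' ∈ cur
      · rw [if_pos (by simpa using h), List.map_cons, ih []]
        simp [h]
      · rw [if_neg (by simpa using h), ih []]
        simp [h]
    · rw [if_neg hc, if_neg hc, ih (c :: cur)]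
      have h1 : ((c :: cur).length : Int) = (cur.length : Int) + 1 := by
        push_cast [List.length_cons]; ring
      have h2 : (c :: cur).contains '#' = (cur.contains '#' || c = '#') := by
        simp [eq_comm, Bool.or_comm]
      rw [h1, h2]

theorem aLoop_eq (gs : List (List Char)) (ks : List Int) :
    (if gs.length ≠ ks.length then false else aLoop gs ks)
      = decide (gs.map (fun g => (g.length : Int)) = ks) := by
  induction gs generalizing ks with
  | nil => cases ks <;> simp [aLoop]
  | cons g gs ih =>
    cases ks with
    | nil => simp
    | cons k ks' =>
      by_cases hl : gs.length = ks'.length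
      · rw [if_neg (by simp [hl])]
        have H := ih ks'
        rw [if_neg (by simp [hl])] at H
        by_cases hk : (g.length : Int) = k
        · simp [aLoop, hk, H]
        · simp [aLoop, hk]
      · rw [if_pos (by simp [hl])]
        symm
        simp only [decide_eq_false_iff_not]
        intro h
        apply hl
        simpa using congrArg List.length h

theorem bLoop_eq (cs : List Char) (run : Int) (seen : Bool) (ks : List Int) :
    bLoop (cs ++ ['.']) run seen ks = decide (segs cs run seen = ks) := by
  induction cs generalizing run seen ks with
  | nil =>
    cases seen with
    | false => cases ks <;> simp [bLoop, segs]
    | true =>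
      cases ks with
      | nil => simp [bLoop, segs]
      | cons k ks' =>
        by_cases hk : run = k
        · cases ks' <;> simp [bLoop, segs, hk]
        · simp [bLoop, segs, hk]
  | cons c cs ih =>
    by_cases hc : c = '.'
    · subst hc
      cases seen with
      | false => simp [bLoop, segs, ih 0 false ks]
      | true =>
        cases ks with
        | nil => simp [bLoop, segs]
        | cons k ks' =>
          by_cases hk : run = k
          · simp [bLoop, segs, hk, ih 0 false ks']
          · simp [bLoop, segs, hk]
    · simp [bLoop, segs, hc, ih (run + 1) (seen || c = '#') ks]

-- ===== VERDICT (by name: the statement is the Claim_ definition above) =====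
theorem does_fit_spec : Claim_equal_does_fit := by
  intro possible counts _
  unfold Spec_does_fit does_fit does_fit_alt
  rw [splitOn_eq_splitAux, bLoop_eq, aLoop_eq, filter_map_splitAux]
  simp
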